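-- pv_equiv track=rewrite | github.com/rospoly/boomble | trace/causality_graph.py | build_dictionary_for_diff
-- ===== SOURCE A (Python) =====
-- def build_dictionary_for_diff(counter_labels_original, counter_labels_comparison):
--     counter_label_diff = {}
--     for key_original in counter_labels_original:
--         comp_value = counter_labels_comparison.get(key_original, 0)
--         counter_label_diff[key_original] = comp_value - counter_labels_original[key_original]
--
--     keys_orig = counter_labels_original.keys()
--     keys_cmp = counter_labels_comparison.keys()
--     difference = keys_cmp - keys_orig
--     for key in difference:
--         counter_label_diff[key] = counter_labels_comparison[key]
--     return counter_label_diff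
-- ===== SOURCE B (Python) =====
-- def build_dictionary_for_diff(counter_labels_original, counter_labels_comparison):
--     keys = dict.fromkeys(list(counter_labels_original) + list(counter_labels_comparison))
--     return {k: counter_labels_comparison.get(k, 0) - counter_labels_original.get(k, 0)
--             for k in keys}
-- ===== Notes on version B (the rewrite author's own statement) =====
-- stated objective: simpler
-- what changed: Replaces A's two differently-shaped passes (one over original keys with subtraction, one over the explicit key-set difference copying comparison values) by a single symmetric dict comprehension over the ordered union of both key lists, computing comparison.get(k,0) - original.get(k,0) for every key.
import Mathlib
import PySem

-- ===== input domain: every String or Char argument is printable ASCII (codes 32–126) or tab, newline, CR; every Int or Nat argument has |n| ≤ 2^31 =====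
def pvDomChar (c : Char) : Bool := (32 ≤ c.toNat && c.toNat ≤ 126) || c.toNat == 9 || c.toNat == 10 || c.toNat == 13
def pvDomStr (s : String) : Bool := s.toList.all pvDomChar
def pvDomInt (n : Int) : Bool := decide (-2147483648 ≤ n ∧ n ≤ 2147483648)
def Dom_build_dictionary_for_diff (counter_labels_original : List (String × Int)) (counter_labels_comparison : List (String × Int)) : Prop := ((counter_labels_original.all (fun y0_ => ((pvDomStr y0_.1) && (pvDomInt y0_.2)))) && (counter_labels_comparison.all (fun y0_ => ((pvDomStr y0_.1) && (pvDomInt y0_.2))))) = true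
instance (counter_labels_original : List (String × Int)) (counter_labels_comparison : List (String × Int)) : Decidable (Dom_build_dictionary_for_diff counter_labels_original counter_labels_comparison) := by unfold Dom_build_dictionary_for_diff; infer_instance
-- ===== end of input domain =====

-- B replaces A's two differently-shaped passes by one symmetric pass over the ordered
-- union of both key lists (simpler decomposition; same value for every key).
-- The Lean order of A's second loop follows the deterministic Set model of PySem
-- (Python's own hash iteration order over the key-set difference is not modelled;
-- dict outputs are compared ignoring order).

-- ===== PORT A =====
def build_dictionary_for_diff (counter_labels_original : List (String × Int)) (counter_labels_comparison : List (String × Int)) : List (String × Int) :=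
  let od : PySem.Dict String Int := PySem.Dict.mk counter_labels_original
  let cd : PySem.Dict String Int := PySem.Dict.mk counter_labels_comparison
  -- for key_original in counter_labels_original: diff[key] = comp.get(key,0) - orig[key]
  let counter_label_diff := od.keys.foldl (fun d key_original =>
      let comp_value := cd.getD key_original 0
      d.insert key_original (comp_value - od.getD key_original 0)) PySem.Dict.empty
  let keys_orig := od.keys
  let keys_cmp := cd.keys
  let difference := PySem.Set.diff (PySem.Set.ofList keys_cmp) keys_orig
  (difference.foldl (fun d key => d.insert key (cd.getD key 0)) counter_label_diff).items

-- ===== PORT B =====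
def build_dictionary_for_diff_alt (counter_labels_original : List (String × Int)) (counter_labels_comparison : List (String × Int)) : List (String × Int) :=
  let od : PySem.Dict String Int := PySem.Dict.mk counter_labels_original
  let cd : PySem.Dict String Int := PySem.Dict.mk counter_labels_comparison
  let keys := PySem.List.dedup (od.keys ++ cd.keys)
  keys.map (fun k => (k, cd.getD k 0 - od.getD k 0))

-- ===== PRECONDITION & SPEC =====
def Spec_build_dictionary_for_diff (counter_labels_original : List (String × Int)) (counter_labels_comparison : List (String × Int)) (out : List (String × Int)) : Prop := out = build_dictionary_for_diff_alt counter_labels_original counter_labels_comparison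
instance (counter_labels_original : List (String × Int)) (counter_labels_comparison : List (String × Int)) (out : List (String × Int)) : Decidable (Spec_build_dictionary_for_diff counter_labels_original counter_labels_comparison out) := by unfold Spec_build_dictionary_for_diff; infer_instance

-- ===== CLAIM (what is proved, stated in full; the proofs are below) =====
def Claim_equal_build_dictionary_for_diff : Prop := ∀ (counter_labels_original : List (String × Int)) (counter_labels_comparison : List (String × Int)), Dom_build_dictionary_for_diff counter_labels_original counter_labels_comparison → Spec_build_dictionary_for_diff counter_labels_original counter_labels_comparison (build_dictionary_for_diff counter_labels_original counter_labels_comparison)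

-- ===== LEMMAS AND PROOFS =====

-- getD after a loop that inserts a key-determined value for every key of l.
theorem getD_foldl_insert_keyfun (l : List String) (f : String → Int)
    (d : PySem.Dict String Int) (k : String) :
    (l.foldl (fun d key => d.insert key (f key)) d).getD k 0
      = if k ∈ l then f k else d.getD k 0 := by
  induction l generalizing d with
  | nil => simp
  | cons x xs ih =>
    simp only [List.foldl_cons, ih, PySem.Dict.getD_insert, List.mem_cons]
    by_cases hk : k ∈ xs <;> by_cases hx : k = x <;> simp [hk, hx]

-- items of such a loop started from the empty dict.
theorem items_foldl_insert_keyfun (l : List String) (f : String → Int) :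
    (l.foldl (fun d key => d.insert key (f key)) PySem.Dict.empty).items
      = (PySem.List.dedup l).map (fun k => (k, f k)) := by
  have hnd : (l.foldl (fun d key => d.insert key (f key)) PySem.Dict.empty).keys.Nodup :=
    PySem.Dict.nodup_keys_foldl_insert l (fun d key => f key) PySem.Dict.empty
      PySem.Dict.nodup_keys_empty
  have hkeys : (l.foldl (fun d key => d.insert key (f key)) PySem.Dict.empty).keys
      = PySem.List.dedup l := by
    rw [PySem.Dict.keys_foldl_insert]
    simp [PySem.Set.update_nil_left]
  rw [PySem.Dict.items_eq_map_keys _ hnd 0, hkeys]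
  apply List.map_congr_left
  intro k hk
  have hkl : k ∈ l := (PySem.List.mem_dedup _ _).1 hk
  rw [getD_foldl_insert_keyfun]
  simp [hkl]

-- ===== VERDICT (by name: the statement is the Claim_ definition above) =====
theorem build_dictionary_for_diff_spec : Claim_equal_build_dictionary_for_diff := by
  intro o c _
  unfold Spec_build_dictionary_for_diff build_dictionary_for_diff build_dictionary_for_diff_alt
  simp only []
  set od : PySem.Dict String Int := PySem.Dict.mk o with hod
  set cd : PySem.Dict String Int := PySem.Dict.mk c with hcd
  set f : String → Int := fun k => cd.getD k 0 - od.getD k 0 with hf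
  -- the first loop
  have h1 : (od.keys.foldl (fun d key => d.insert key (cd.getD key 0 - od.getD key 0))
      PySem.Dict.empty).items = (PySem.List.dedup od.keys).map (fun k => (k, f k)) :=
    items_foldl_insert_keyfun od.keys f
  -- the second loop appends: its keys are fresh and distinct
  set diffd := od.keys.foldl (fun d key => d.insert key (cd.getD key 0 - od.getD key 0))
      PySem.Dict.empty with hdiffd
  set difference := PySem.Set.diff (PySem.Set.ofList cd.keys) od.keys with hdifference
  have hdk : diffd.keys = PySem.List.dedup od.keys := by
    rw [hdiffd, PySem.Dict.keys_foldl_insert]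
    simp [PySem.Set.update_nil_left]
  have hfresh : ∀ a ∈ difference, diffd.contains a = false := by
    intro a ha
    have : a ∉ od.keys := ((PySem.Set.mem_diff _ _ _).1 ha).2
    have : a ∉ diffd.keys := by rw [hdk]; simpa [PySem.List.mem_dedup]
    simpa [PySem.Dict.contains_eq_decide_mem_keys]
  have hndiff : difference.Nodup :=
    PySem.Set.nodup_diff _ _ (PySem.Set.nodup_ofList _)
  have h2 : (difference.foldl (fun d key => d.insert key (cd.getD key 0)) diffd).items
      = diffd.items ++ difference.map (fun k => (k, cd.getD k 0)) := by
    have := PySem.Dict.items_foldl_insert_fresh (l := difference) (d := diffd)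
      (k := fun a => a) (v := fun a => cd.getD a 0) hfresh (by simpa using hndiff)
    simpa using this
  rw [h2, h1]
  -- on fresh keys the original count is 0, so the copied value equals f
  have h3 : difference.map (fun k => (k, cd.getD k 0)) = difference.map (fun k => (k, f k)) := by
    apply List.map_congr_left
    intro k hk
    have hko : k ∉ od.keys := ((PySem.Set.mem_diff _ _ _).1 hk).2
    have hc : od.contains k = false := by
      simpa [PySem.Dict.contains_eq_decide_mem_keys]
    show (k, cd.getD k 0) = (k, cd.getD k 0 - od.getD k 0)
    rw [PySem.Dict.getD_of_not_contains od 0 hc, sub_zero]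
  rw [h3]
  -- the union key list splits into original keys ++ fresh comparison keys
  have h4 : PySem.List.dedup (od.keys ++ cd.keys)
      = PySem.List.dedup od.keys ++ difference := by
    rw [PySem.List.dedup_eq_ofList, PySem.Set.ofList_append,
        PySem.Set.update_eq_append_filter, PySem.List.dedup_eq_ofList, hdifference]
    congr 1
    · unfold PySem.Set.diff
      apply List.filter_congr
      intro x hx
      simp [PySem.Set.mem_ofList]
  rw [h4, List.map_append]
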